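-- pv_equiv track=rewrite | github.com/EndlessBeard/SiteMapper | site_mapper/core/crawler.py | _get_expected_content_type
-- ===== SOURCE A (Python) =====
-- def _get_expected_content_type(url, filename):
--     """Determine expected content type based on URL or filename."""
--     if url.lower().endswith('.pdf') or (filename and filename.lower().endswith('.pdf')):
--         return 'application/pdf'
--     elif any(url.lower().endswith(ext) or (filename and filename.lower().endswith(ext))
--             for ext in ['.doc', '.docx']):
--         return 'application/vnd.openxmlformats-officedocument.wordprocessingml'
--     elif any(url.lower().endswith(ext) or (filename and filename.lower().endswith(ext))
--             for ext in ['.xls', '.xlsx']):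
--         return 'application/vnd.openxmlformats-officedocument.spreadsheetml'
--     return None
-- ===== SOURCE B (Python) =====
-- _EXT_TO_TYPE = {
--     '.pdf': 'application/pdf',
--     '.doc': 'application/vnd.openxmlformats-officedocument.wordprocessingml',
--     '.docx': 'application/vnd.openxmlformats-officedocument.wordprocessingml',
--     '.xls': 'application/vnd.openxmlformats-officedocument.spreadsheetml',
--     '.xlsx': 'application/vnd.openxmlformats-officedocument.spreadsheetml',
-- }
--
-- _PRIORITY = [
--     'application/pdf',
--     'application/vnd.openxmlformats-officedocument.wordprocessingml',
--     'application/vnd.openxmlformats-officedocument.spreadsheetml',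
-- ]
--
--
-- def _get_expected_content_type(url, filename):
--     """Determine expected content type based on URL or filename."""
--     found = set()
--     for s in (url, filename):
--         if not s:
--             continue
--         s = s.lower()
--         i = s.rfind('.')
--         if i != -1:
--             t = _EXT_TO_TYPE.get(s[i:])
--             if t is not None:
--                 found.add(t)
--     for t in _PRIORITY:
--         if t in found:
--             return t
--     return None
-- ===== Notes on version B (the rewrite author's own statement) =====
-- stated objective: idiomatic
-- what changed: Replaces the repeated per-extension endswith scans over both sources with a single last-dot suffix extraction (rfind) per source plus one lookup in an extension-to-type dict, collecting the matched tiers in a set and returning the first one in priority order.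
import Mathlib
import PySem

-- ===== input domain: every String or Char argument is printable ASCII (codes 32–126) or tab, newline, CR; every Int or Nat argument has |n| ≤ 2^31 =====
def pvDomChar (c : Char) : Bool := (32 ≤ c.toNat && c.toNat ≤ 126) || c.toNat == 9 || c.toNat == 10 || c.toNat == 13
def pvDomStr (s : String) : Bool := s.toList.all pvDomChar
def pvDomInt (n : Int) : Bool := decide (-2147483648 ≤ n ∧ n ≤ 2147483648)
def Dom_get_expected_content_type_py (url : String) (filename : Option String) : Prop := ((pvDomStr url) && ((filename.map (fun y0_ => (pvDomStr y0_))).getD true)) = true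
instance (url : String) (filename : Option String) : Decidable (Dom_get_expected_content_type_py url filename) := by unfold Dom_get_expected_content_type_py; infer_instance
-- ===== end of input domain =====

-- B replaces A's repeated per-extension endswith scans by one last-dot suffix extraction
-- plus a dict lookup per source, collecting matched tiers and returning the highest-priority one (idiomatic).

-- ===== PORT A =====
-- `url.lower().endswith(ext)`
def pvUrlEnds (url : String) (ext : String) : Bool :=
  PySem.Str.endswith (PySem.Str.lower url) ext

-- `filename and filename.lower().endswith(ext)` as a Bool condition (None and "" are falsy)
def pvFnEnds (filename : Option String) (ext : String) : Bool :=
  match filename with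
  | none => false
  | some f => if f = "" then false else PySem.Str.endswith (PySem.Str.lower f) ext

def get_expected_content_type_py (url : String) (filename : Option String) : Option String :=
  if pvUrlEnds url ".pdf" || pvFnEnds filename ".pdf" then
    some "application/pdf"
  else if [".doc", ".docx"].any (fun ext => pvUrlEnds url ext || pvFnEnds filename ext) then
    some "application/vnd.openxmlformats-officedocument.wordprocessingml"
  else if [".xls", ".xlsx"].any (fun ext => pvUrlEnds url ext || pvFnEnds filename ext) then
    some "application/vnd.openxmlformats-officedocument.spreadsheetml"
  else none

-- ===== PORT B =====
def pvExtToType : PySem.Dict String String := PySem.Dict.ofList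
  [(".pdf", "application/pdf"),
   (".doc", "application/vnd.openxmlformats-officedocument.wordprocessingml"),
   (".docx", "application/vnd.openxmlformats-officedocument.wordprocessingml"),
   (".xls", "application/vnd.openxmlformats-officedocument.spreadsheetml"),
   (".xlsx", "application/vnd.openxmlformats-officedocument.spreadsheetml")]

def pvPriorityL : List String :=
  ["application/pdf",
   "application/vnd.openxmlformats-officedocument.wordprocessingml",
   "application/vnd.openxmlformats-officedocument.spreadsheetml"]

-- `s = s.lower(); i = s.rfind('.'); if i != -1: t = _EXT_TO_TYPE.get(s[i:])`
def pvTierOf (s : String) : Option String :=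
  let sl := PySem.Str.lower s
  let i := PySem.Str.rfind sl "."
  if i = -1 then none else PySem.Dict.get? pvExtToType (PySem.Str.slice sl (some i) none)

-- one iteration of `for s in (url, filename): if not s: continue; …; found.add(t)`
def pvAddSource (found : PySem.Set String) (so : Option String) : PySem.Set String :=
  match so with
  | none => found
  | some s =>
    if s = "" then found
    else
      match pvTierOf s with
      | some t => PySem.Set.add found t
      | none => found

def get_expected_content_type_py_alt (url : String) (filename : Option String) : Option String :=
  let found := [some url, filename].foldl pvAddSource PySem.Set.empty
  pvPriorityL.find? (fun t => PySem.Set.contains found t)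

-- ===== PRECONDITION & SPEC =====
def Spec_get_expected_content_type_py (url : String) (filename : Option String) (out : Option String) : Prop := out = get_expected_content_type_py_alt url filename
instance (url : String) (filename : Option String) (out : Option String) : Decidable (Spec_get_expected_content_type_py url filename out) := by unfold Spec_get_expected_content_type_py; infer_instance

-- ===== CLAIM (what is proved, stated in full; the proofs are below) =====
def Claim_equal_get_expected_content_type_py : Prop := ∀ (url : String) (filename : Option String), Dom_get_expected_content_type_py url filename → Spec_get_expected_content_type_py url filename (get_expected_content_type_py url filename)

-- ===== LEMMAS AND PROOFS =====

-- index of the LAST '.' in a list of chars (clean recursion used to specify rfind '.')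
def pvLdIdx : List Char → Option Nat
  | [] => none
  | c :: cs =>
    match pvLdIdx cs with
    | some i => some (i + 1)
    | none => if c = '.' then some 0 else none

-- the suffix from the last dot (what `s[s.rfind('.'):]` extracts)
def pvSuffix (l : List Char) : Option (List Char) := (pvLdIdx l).map l.drop

def pvE (l e : List Char) : Bool := PySem.Chars.endswith l e

-- per-source classification in A's terms
def pvClassify (l : List Char) : Option String :=
  if pvE l ['.','p','d','f'] then some "application/pdf"
  else if pvE l ['.','d','o','c'] || pvE l ['.','d','o','c','x'] then
    some "application/vnd.openxmlformats-officedocument.wordprocessingml"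
  else if pvE l ['.','x','l','s'] || pvE l ['.','x','l','s','x'] then
    some "application/vnd.openxmlformats-officedocument.spreadsheetml"
  else none

-- B's priority selection on the two per-source tiers
def pvAddTier (found : PySem.Set String) (t? : Option String) : PySem.Set String :=
  match t? with
  | some t => PySem.Set.add found t
  | none => found

def pvPick (ta tb : Option String) : Option String :=
  pvPriorityL.find? (fun t => PySem.Set.contains (pvAddTier (pvAddTier PySem.Set.empty ta) tb) t)

theorem pvLdIdx_append (a b : List Char) :
    pvLdIdx (a ++ b) = match pvLdIdx b with
      | some i => some (a.length + i)
      | none => pvLdIdx a := by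
  induction a with
  | nil => cases h : pvLdIdx b <;> simp [pvLdIdx, h]
  | cons c cs ih =>
    simp only [List.cons_append, pvLdIdx, ih]
    cases h : pvLdIdx b <;> cases h2 : pvLdIdx cs <;> simp [h, h2] <;> omega

theorem pvLdIdx_eq_none_iff (l : List Char) : pvLdIdx l = none ↔ '.' ∉ l := by
  induction l with
  | nil => simp [pvLdIdx]
  | cons c cs ih =>
    simp only [pvLdIdx]
    cases h : pvLdIdx cs <;> simp [h] at ih ⊢ <;> simp [ih] <;> tauto

theorem pv_go_eq (s : List Char) (j : Nat) :
    PySem.Chars.rfind.go s ['.'] j =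
      match pvLdIdx (s.take (j+1)) with
      | some i => (i : Int)
      | none => -1 := by
  induction j with
  | zero =>
    rw [PySem.Chars.rfind.go]
    cases s with
    | nil => simp [pvLdIdx, List.isPrefixOf]
    | cons c cs =>
      have hp : (['.'].isPrefixOf (c :: cs)) = ('.' == c) := by
        simp [List.isPrefixOf]
      rw [show (c :: cs).take 1 = [c] from rfl, hp]
      by_cases hc : c = '.'
      · simp [pvLdIdx, hc]
      · have hbc : ('.' == c) = false := by
          simp only [beq_eq_false_iff_ne]; exact Ne.symm hc
        simp [pvLdIdx, hc, hbc]
  | succ j ih =>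
    rw [PySem.Chars.rfind.go]
    by_cases hlt : j + 1 < s.length
    · have htake : s.take (j+2) = s.take (j+1) ++ [s[j+1]] := by
        rw [← List.take_concat_get hlt, List.concat_eq_append]
      have hdrop : s.drop (j+1) = s[j+1] :: s.drop (j+2) := by
        rw [List.drop_eq_getElem_cons hlt]
      have hp : (['.'].isPrefixOf (s.drop (j+1))) = ('.' == s[j+1]) := by
        rw [hdrop]; simp [List.isPrefixOf]
      rw [htake, pvLdIdx_append, hp]
      by_cases hc : s[j+1] = '.'
      · have hlen : (s.take (j+1)).length = j + 1 := by
          simp [List.length_take]; omega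
        have h1 : pvLdIdx [s[j+1]] = some 0 := by simp [pvLdIdx, hc]
        rw [h1]
        simp [hc, hlen]
      · have h1 : pvLdIdx [s[j+1]] = none := by simp [pvLdIdx, hc]
        have hbc : ('.' == s[j+1]) = false := by
          simp only [beq_eq_false_iff_ne]; exact Ne.symm hc
        rw [h1, hbc, ih]
        simp
    · have h1 : s.drop (j+1) = [] := by
        rw [List.drop_eq_nil_iff]; omega
      have h2 : s.take (j+2) = s.take (j+1) := by
        rw [List.take_of_length_le (by omega), List.take_of_length_le (by omega)]
      rw [h1, h2, ih]
      simp [List.isPrefixOf]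

theorem pv_rfind_dot_eq (l : List Char) :
    PySem.Chars.rfind l ['.'] =
      match pvLdIdx l with
      | some i => (i : Int)
      | none => -1 := by
  rw [PySem.Chars.rfind, pv_go_eq]
  rw [List.take_of_length_le (by omega)]

theorem pvSuffix_of_endswith (l tl : List Char) (h : '.' ∉ tl)
    (hs : ('.' :: tl) <:+ l) : pvSuffix l = some ('.' :: tl) := by
  obtain ⟨a, ha⟩ := hs
  subst ha
  have h0 : pvLdIdx ('.' :: tl) = some 0 := by
    simp [pvLdIdx, (pvLdIdx_eq_none_iff tl).mpr h]
  simp [pvSuffix, pvLdIdx_append, h0, List.drop_left]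

theorem pv_endswith_of_suffix (l t : List Char) (h : pvSuffix l = some t) : t <:+ l := by
  simp only [pvSuffix, Option.map_eq_some_iff] at h
  obtain ⟨i, _, rfl⟩ := h
  exact List.drop_suffix i l

theorem pvE_true_of_suffix (l t : List Char) (h : pvSuffix l = some t) : pvE l t = true := by
  rw [pvE, PySem.Chars.endswith_iff]
  exact pv_endswith_of_suffix l t h

theorem pvE_false_of_no_dot (l e : List Char) (h : '.' ∉ l) (he : '.' ∈ e) :
    pvE l e = false := by
  rw [pvE, Bool.eq_false_iff]
  intro hc
  exact h (((PySem.Chars.endswith_iff l e).mp hc).subset he)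

theorem pvE_false_of_suffix_ne (l t tl : List Char) (h : pvSuffix l = some t)
    (hdot : '.' ∉ tl) (hne : t ≠ '.' :: tl) : pvE l ('.' :: tl) = false := by
  rw [pvE, Bool.eq_false_iff]
  intro hc
  have := pvSuffix_of_endswith l tl hdot ((PySem.Chars.endswith_iff _ _).mp hc)
  rw [h] at this
  exact hne (Option.some_injective _ this)

-- the String-keyed dict lookup, in list form
def pvLookupL (t : List Char) : Option String :=
  if ['.','p','d','f'] = t then some "application/pdf"
  else if ['.','d','o','c'] = t then some "application/vnd.openxmlformats-officedocument.wordprocessingml"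
  else if ['.','d','o','c','x'] = t then some "application/vnd.openxmlformats-officedocument.wordprocessingml"
  else if ['.','x','l','s'] = t then some "application/vnd.openxmlformats-officedocument.spreadsheetml"
  else if ['.','x','l','s','x'] = t then some "application/vnd.openxmlformats-officedocument.spreadsheetml"
  else none

theorem pv_get_eq_lookupL (k : String) :
    PySem.Dict.get? pvExtToType k = pvLookupL k.toList := by
  have hs : ∀ a : String, (a == k) = decide (a.toList = k.toList) := by
    intro a
    rw [beq_eq_decide]
    simp [String.ext_iff]
  have hmk : pvExtToType = PySem.Dict.mk
    [(".pdf", "application/pdf"),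
     (".doc", "application/vnd.openxmlformats-officedocument.wordprocessingml"),
     (".docx", "application/vnd.openxmlformats-officedocument.wordprocessingml"),
     (".xls", "application/vnd.openxmlformats-officedocument.spreadsheetml"),
     (".xlsx", "application/vnd.openxmlformats-officedocument.spreadsheetml")] := by decide
  rw [hmk]
  simp only [PySem.Dict.get?_mk_cons, hs, decide_eq_true_eq,
    show ".pdf".toList = ['.','p','d','f'] from rfl,
    show ".doc".toList = ['.','d','o','c'] from rfl,
    show ".docx".toList = ['.','d','o','c','x'] from rfl,
    show ".xls".toList = ['.','x','l','s'] from rfl,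
    show ".xlsx".toList = ['.','x','l','s','x'] from rfl]
  unfold pvLookupL
  split_ifs <;> simp_all [PySem.Dict.get?]

theorem pv_tier_eq (s : String) :
    pvTierOf s = pvClassify ((PySem.Str.lower s).toList) := by
  show (if PySem.Str.rfind (PySem.Str.lower s) "." = -1 then none
    else PySem.Dict.get? pvExtToType
      (PySem.Str.slice (PySem.Str.lower s) (some (PySem.Str.rfind (PySem.Str.lower s) ".")) none))
    = pvClassify ((PySem.Str.lower s).toList)
  rw [PySem.Str.rfind_eq, show (".").toList = ['.'] from rfl, pv_rfind_dot_eq]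
  set sl := PySem.Str.lower s with hsl
  cases hidx : pvLdIdx sl.toList with
  | none =>
    have hnd : '.' ∉ sl.toList := (pvLdIdx_eq_none_iff _).mp hidx
    have f1 := pvE_false_of_no_dot sl.toList ['.','p','d','f'] hnd (by decide)
    have f2 := pvE_false_of_no_dot sl.toList ['.','d','o','c'] hnd (by decide)
    have f3 := pvE_false_of_no_dot sl.toList ['.','d','o','c','x'] hnd (by decide)
    have f4 := pvE_false_of_no_dot sl.toList ['.','x','l','s'] hnd (by decide)
    have f5 := pvE_false_of_no_dot sl.toList ['.','x','l','s','x'] hnd (by decide)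
    unfold pvClassify
    simp [f1, f2, f3, f4, f5]
  | some i =>
    have hne : ¬((i : Int) = -1) := by omega
    rw [if_neg hne]
    have hsuf : pvSuffix sl.toList = some (sl.toList.drop i) := by
      simp [pvSuffix, hidx]
    have hslice : (PySem.Str.slice sl (some (i : Int)) none).toList = sl.toList.drop i := by
      rw [PySem.Str.toList_slice, PySem.Chars.slice_eq_listSlice, PySem.List.slice_from_natCast]
    rw [pv_get_eq_lookupL, hslice]
    by_cases h1 : sl.toList.drop i = ['.','p','d','f']
    · rw [h1] at hsuf
      have e1 := pvE_true_of_suffix _ _ hsuf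
      unfold pvClassify pvLookupL
      simp [h1, e1]
    by_cases h2 : sl.toList.drop i = ['.','d','o','c']
    · rw [h2] at hsuf
      have epdf := pvE_false_of_suffix_ne _ _ ['p','d','f'] hsuf (by decide) (by decide)
      have edoc := pvE_true_of_suffix _ _ hsuf
      unfold pvClassify pvLookupL
      simp [h1, h2, epdf, edoc]
    by_cases h3 : sl.toList.drop i = ['.','d','o','c','x']
    · rw [h3] at hsuf
      have epdf := pvE_false_of_suffix_ne _ _ ['p','d','f'] hsuf (by decide) (by decide)
      have edocx := pvE_true_of_suffix _ _ hsuf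
      unfold pvClassify pvLookupL
      simp [h1, h2, h3, epdf, edocx]
    by_cases h4 : sl.toList.drop i = ['.','x','l','s']
    · rw [h4] at hsuf
      have epdf := pvE_false_of_suffix_ne _ _ ['p','d','f'] hsuf (by decide) (by decide)
      have edoc := pvE_false_of_suffix_ne _ _ ['d','o','c'] hsuf (by decide) (by decide)
      have edocx := pvE_false_of_suffix_ne _ _ ['d','o','c','x'] hsuf (by decide) (by decide)
      have exls := pvE_true_of_suffix _ _ hsuf
      unfold pvClassify pvLookupL
      simp [h1, h2, h3, h4, epdf, edoc, edocx, exls]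
    by_cases h5 : sl.toList.drop i = ['.','x','l','s','x']
    · rw [h5] at hsuf
      have epdf := pvE_false_of_suffix_ne _ _ ['p','d','f'] hsuf (by decide) (by decide)
      have edoc := pvE_false_of_suffix_ne _ _ ['d','o','c'] hsuf (by decide) (by decide)
      have edocx := pvE_false_of_suffix_ne _ _ ['d','o','c','x'] hsuf (by decide) (by decide)
      have exlsx := pvE_true_of_suffix _ _ hsuf
      unfold pvClassify pvLookupL
      simp [h1, h2, h3, h4, h5, epdf, edoc, edocx, exlsx]
    · have epdf := pvE_false_of_suffix_ne _ _ ['p','d','f'] hsuf (by decide) h1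
      have edoc := pvE_false_of_suffix_ne _ _ ['d','o','c'] hsuf (by decide) h2
      have edocx := pvE_false_of_suffix_ne _ _ ['d','o','c','x'] hsuf (by decide) h3
      have exls := pvE_false_of_suffix_ne _ _ ['x','l','s'] hsuf (by decide) h4
      have exlsx := pvE_false_of_suffix_ne _ _ ['x','l','s','x'] hsuf (by decide) h5
      unfold pvClassify pvLookupL
      simp [Ne.symm h1, Ne.symm h2, Ne.symm h3, Ne.symm h4, Ne.symm h5,
        epdf, edoc, edocx, exls, exlsx]

theorem pvClassify_cases (l : List Char) :
    pvClassify l = none ∨ pvClassify l = some "application/pdf" ∨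
    pvClassify l = some "application/vnd.openxmlformats-officedocument.wordprocessingml" ∨
    pvClassify l = some "application/vnd.openxmlformats-officedocument.spreadsheetml" := by
  unfold pvClassify; split_ifs <;> simp

theorem pv_core (a b : List Char) :
    (if pvE a ['.','p','d','f'] || pvE b ['.','p','d','f'] then
      some "application/pdf"
    else if pvE a ['.','d','o','c'] || pvE b ['.','d','o','c'] ||
            (pvE a ['.','d','o','c','x'] || pvE b ['.','d','o','c','x']) then
      some "application/vnd.openxmlformats-officedocument.wordprocessingml"
    else if pvE a ['.','x','l','s'] || pvE b ['.','x','l','s'] ||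
            (pvE a ['.','x','l','s','x'] || pvE b ['.','x','l','s','x']) then
      some "application/vnd.openxmlformats-officedocument.spreadsheetml"
    else none)
    = pvPick (pvClassify a) (pvClassify b) := by
  have ca := pvClassify_cases a
  have cb := pvClassify_cases b
  rcases ca with ha | ha | ha | ha <;> rcases cb with hb | hb | hb | hb <;>
    rw [ha, hb] <;>
    unfold pvClassify at ha hb <;>
    split_ifs at ha hb <;>
    simp_all [pvPick, pvAddTier, pvPriorityL, PySem.Set.add, PySem.Set.contains,
      PySem.Set.empty, List.find?] <;>
    (intros; simp_all)

theorem pvClassify_nil :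
    pvClassify [] = none := by decide

-- ===== VERDICT (by name: the statement is the Claim_ definition above) =====
theorem get_expected_content_type_py_spec : Claim_equal_get_expected_content_type_py := by
  intro url filename _hdom
  unfold Spec_get_expected_content_type_py
  unfold get_expected_content_type_py get_expected_content_type_py_alt
  simp only [List.foldl]
  have hlow_empty : (PySem.Str.lower "").toList = [] := by decide
  have hnilE : ∀ e : List Char, e ≠ [] → PySem.Chars.endswith [] e = false := by
    intro e he
    rw [Bool.eq_false_iff]
    intro hx
    exact he (List.suffix_nil.mp ((PySem.Chars.endswith_iff _ _).mp hx))
  -- the filename side as a char list (empty for falsy filenames)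
  set bL : List Char := (match filename with
    | none => []
    | some f => if f = "" then [] else (PySem.Str.lower f).toList) with hbL
  -- one loop iteration adds exactly the source's tier
  have hstep : ∀ (acc : PySem.Set String) (s : String),
      pvAddSource acc (some s) = pvAddTier acc (pvClassify ((PySem.Str.lower s).toList)) := by
    intro acc s
    by_cases h : s = ""
    · subst h
      simp [pvAddSource, pvAddTier, hlow_empty, pvClassify_nil]
    · rw [show pvAddSource acc (some s)
          = (if s = "" then acc else
              match pvTierOf s with
              | some t => PySem.Set.add acc t
              | none => acc) from rfl]
      rw [if_neg h, pv_tier_eq]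
      cases pvClassify ((PySem.Str.lower s).toList) <;> rfl
  have hu : pvAddSource PySem.Set.empty (some url)
      = pvAddTier PySem.Set.empty (pvClassify ((PySem.Str.lower url).toList)) := hstep _ _
  have hf : ∀ acc : PySem.Set String,
      pvAddSource acc filename = pvAddTier acc (pvClassify bL) := by
    intro acc
    cases filename with
    | none => simp [pvAddSource, pvAddTier, hbL, pvClassify_nil]
    | some f =>
      by_cases h : f = ""
      · subst h
        rw [hstep]
        simp [pvAddTier, hbL, hlow_empty, pvClassify_nil]
      · rw [hstep]
        simp [hbL, h]
  rw [hu, hf]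
  -- reduce A's endswith tests to pvE on char lists
  have hUE : ∀ e : String, pvUrlEnds url e = pvE (PySem.Str.lower url).toList e.toList := by
    intro e; rw [pvUrlEnds, pvE, PySem.Str.endswith_eq]
  have hFE : ∀ e : String, e.toList ≠ [] → pvFnEnds filename e = pvE bL e.toList := by
    intro e he
    cases filename with
    | none =>
      have hb : bL = [] := by simp [hbL]
      rw [hb, show pvFnEnds none e = false from rfl, pvE, hnilE _ he]
    | some f =>
      by_cases h : f = ""
      · have hb : bL = [] := by simp [hbL, h]
        rw [hb, show pvFnEnds (some f) e = (if f = "" then false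
              else PySem.Str.endswith (PySem.Str.lower f) e) from rfl,
            if_pos h, pvE, hnilE _ he]
      · have hb : bL = (PySem.Str.lower f).toList := by simp [hbL, h]
        rw [hb, show pvFnEnds (some f) e = (if f = "" then false
              else PySem.Str.endswith (PySem.Str.lower f) e) from rfl,
            if_neg h, pvE, PySem.Str.endswith_eq]
  simp only [List.any_cons, List.any_nil, Bool.or_false]
  rw [hFE ".pdf" (by decide), hFE ".doc" (by decide), hFE ".docx" (by decide),
      hFE ".xls" (by decide), hFE ".xlsx" (by decide)]
  simp only [hUE,
    show ".pdf".toList = ['.','p','d','f'] from rfl,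
    show ".doc".toList = ['.','d','o','c'] from rfl,
    show ".docx".toList = ['.','d','o','c','x'] from rfl,
    show ".xls".toList = ['.','x','l','s'] from rfl,
    show ".xlsx".toList = ['.','x','l','s','x'] from rfl]
  have h := pv_core ((PySem.Str.lower url).toList) bL
  unfold pvPick at h
  exact h
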